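-- pv_equiv track=rewrite | github.com/EluciferE/prachka | telegramBot/telegram_bot.py | parse_tmp
-- ===== SOURCE A (Python) =====
-- def parse_tmp(tmp):
--     tmp = tmp.split('/')
--     tmp = [x for x in tmp if x]
--     ans = {}
--     if len(tmp) > 0:
--         ans["day"] = tmp[0]
--     if len(tmp) > 1:
--         ans["time"] = tmp[1]
--     if len(tmp) > 2:
--         ans["machine"] = tmp[2]
--     if len(tmp) > 3:
--         ans["note"] = '/'.join(tmp[3:])
--     return ans
-- ===== SOURCE B (Python) =====
-- def parse_tmp(tmp):
--     keys = ('day', 'time', 'machine')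
--     ans = {}
--     i = 0
--     buf = []
--     note = []
--     for ch in tmp + '/':
--         if ch != '/':
--             buf.append(ch)
--         elif buf:
--             piece = ''.join(buf)
--             buf = []
--             if i < 3:
--                 ans[keys[i]] = piece
--                 i += 1
--             else:
--                 note.append(piece)
--     if note:
--         ans['note'] = '/'.join(note)
--     return ans
-- ===== Notes on version B (the rewrite author's own statement) =====
-- stated objective: alternative
-- what changed: Replaces split/filter/guarded-assignment/join-of-a-slice with a single character-level scan: one pass over the string with a buffer flushes each nonempty piece directly into the next key or into the note accumulator, never materialising the split list.
import Mathlib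
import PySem

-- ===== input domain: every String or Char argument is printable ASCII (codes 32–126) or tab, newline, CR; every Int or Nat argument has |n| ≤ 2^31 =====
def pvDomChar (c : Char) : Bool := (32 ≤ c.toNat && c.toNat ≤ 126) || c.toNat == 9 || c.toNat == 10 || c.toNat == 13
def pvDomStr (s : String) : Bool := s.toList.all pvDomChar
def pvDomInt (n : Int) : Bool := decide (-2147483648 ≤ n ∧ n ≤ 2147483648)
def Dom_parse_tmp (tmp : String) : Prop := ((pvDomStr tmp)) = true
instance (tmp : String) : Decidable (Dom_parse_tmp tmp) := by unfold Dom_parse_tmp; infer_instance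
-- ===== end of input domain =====

-- B replaces A's split/filter/guarded-assignments/join-of-a-slice by a single character-level
-- scan with a piece buffer (objective: alternative; same O(n) cost, one pass instead of staged passes).


-- ===== PORT A =====
-- Literal port of A: split on '/', filter out empty pieces, then four guarded
-- dict assignments; the dict is returned as its association list (.items).
def parse_tmp (tmp : String) : List (String × String) :=
  let tmp1 := (PySem.Str.split? tmp "/").getD []   -- sep "/" is nonempty, split? is always `some`
  let tmp2 := tmp1.filter (fun x => x != "")
  let ans : PySem.Dict String String := PySem.Dict.empty
  let ans := if tmp2.length > 0 then ans.insert "day" ((PySem.List.pyGet? tmp2 0).getD "") else ans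
  let ans := if tmp2.length > 1 then ans.insert "time" ((PySem.List.pyGet? tmp2 1).getD "") else ans
  let ans := if tmp2.length > 2 then ans.insert "machine" ((PySem.List.pyGet? tmp2 2).getD "") else ans
  let ans := if tmp2.length > 3 then ans.insert "note" (PySem.Str.join "/" (PySem.List.slice tmp2 (some 3) none)) else ans
  ans.items

-- ===== PORT B =====
-- Port of B: one pass over the characters of tmp + '/' with a piece buffer.
-- ''.join(buf) on a list of single characters is String.ofList buf (exact).
def pvKeysB : List String := ["day", "time", "machine"]

def goB : List Char → PySem.Dict String String → Nat → List Char → List String →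
    PySem.Dict String String × List String
  | [], ans, _, _, note => (ans, note)
  | ch :: rest, ans, i, buf, note =>
    if ch ≠ '/' then goB rest ans i (buf ++ [ch]) note
    else if buf ≠ [] then
      if i < 3 then
        goB rest (ans.insert ((PySem.List.pyGet? pvKeysB (i : Int)).getD "") (String.ofList buf)) (i + 1) [] note
      else
        goB rest ans i [] (note ++ [String.ofList buf])
    else goB rest ans i buf note

def parse_tmp_alt (tmp : String) : List (String × String) :=
  let st := goB (tmp.toList ++ ['/']) PySem.Dict.empty 0 [] []
  let ans := if st.2 ≠ [] then st.1.insert "note" (PySem.Str.join "/" st.2) else st.1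
  ans.items

-- ===== PRECONDITION & SPEC =====
def Spec_parse_tmp (tmp : String) (out : List (String × String)) : Prop := out = parse_tmp_alt tmp
instance (tmp : String) (out : List (String × String)) : Decidable (Spec_parse_tmp tmp out) := by unfold Spec_parse_tmp; infer_instance

-- ===== CLAIM (what is proved, stated in full; the proofs are below) =====
def Claim_equal_parse_tmp : Prop := ∀ (tmp : String), Dom_parse_tmp tmp → Spec_parse_tmp tmp (parse_tmp tmp)

-- ===== LEMMAS AND PROOFS =====

-- proof-only helpers: a structural split on '/' and the piece-level view of B's loop
def splitC : List Char → List (List Char)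
  | [] => [[]]
  | c :: cs =>
    if c = '/' then [] :: splitC cs
    else
      match splitC cs with
      | p :: ps => (c :: p) :: ps
      | [] => [[c]]

def modFirst (buf : List Char) : List (List Char) → List (List Char)
  | [] => [buf]
  | p :: ps => (buf ++ p) :: ps

-- piece-level processing of the nonempty pieces
def procNE : List (List Char) → PySem.Dict String String → Nat → List String →
    PySem.Dict String String × List String
  | [], ans, _, note => (ans, note)
  | p :: ps, ans, i, note =>
    if i < 3 then
      procNE ps (ans.insert ((PySem.List.pyGet? pvKeysB (i : Int)).getD "") (String.ofList p)) (i + 1) note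
    else
      procNE ps ans i (note ++ [String.ofList p])

theorem splitC_ne_nil (cs : List Char) : splitC cs ≠ [] := by
  cases cs with
  | nil => simp [splitC]
  | cons c cs =>
    simp only [splitC]
    split
    · simp
    · cases h : splitC cs <;> simp

theorem modFirst_nil (l : List (List Char)) (h : l ≠ []) : modFirst [] l = l := by
  cases l with
  | nil => exact absurd rfl h
  | cons p ps => simp [modFirst]

theorem modFirst_modFirst (a b : List Char) (l : List (List Char)) :
    modFirst a (modFirst b l) = modFirst (a ++ b) l := by
  cases l <;> simp [modFirst]

theorem goB_cons_ne (ch : Char) (cs : List Char) (ans : PySem.Dict String String)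
    (i : Nat) (buf : List Char) (note : List String) (h : ch ≠ '/') :
    goB (ch :: cs) ans i buf note = goB cs ans i (buf ++ [ch]) note := by
  simp [goB, h]

theorem goB_cons_slash_nil (cs : List Char) (ans : PySem.Dict String String)
    (i : Nat) (note : List String) :
    goB ('/' :: cs) ans i [] note = goB cs ans i [] note := by
  simp [goB]

theorem goB_cons_slash_lt (cs : List Char) (ans : PySem.Dict String String)
    (i : Nat) (buf : List Char) (note : List String) (hb : buf ≠ []) (hi : i < 3) :
    goB ('/' :: cs) ans i buf note
      = goB cs (ans.insert ((PySem.List.pyGet? pvKeysB (i : Int)).getD "") (String.ofList buf)) (i + 1) [] note := by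
  simp [goB, hb, hi]

theorem goB_cons_slash_ge (cs : List Char) (ans : PySem.Dict String String)
    (i : Nat) (buf : List Char) (note : List String) (hb : buf ≠ []) (hi : ¬ i < 3) :
    goB ('/' :: cs) ans i buf note = goB cs ans i [] (note ++ [String.ofList buf]) := by
  simp [goB, hb, hi]

-- B's char loop computes procNE of the nonempty pieces of buf ++ cs
theorem goB_eq (cs : List Char) : ∀ (ans : PySem.Dict String String) (i : Nat)
    (buf : List Char) (note : List String),
    goB (cs ++ ['/']) ans i buf note
      = procNE ((modFirst buf (splitC cs)).filter (· ≠ [])) ans i note := by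
  induction cs with
  | nil =>
    intro ans i buf note
    by_cases hb : buf = []
    · subst hb
      rw [List.nil_append, goB_cons_slash_nil]
      simp [goB, splitC, modFirst, procNE]
    · by_cases hi : i < 3
      · rw [List.nil_append, goB_cons_slash_lt _ _ _ _ _ hb hi]
        simp [goB, splitC, modFirst, hb, procNE, hi]
      · rw [List.nil_append, goB_cons_slash_ge _ _ _ _ _ hb hi]
        simp [goB, splitC, modFirst, hb, procNE, hi]
  | cons c cs ih =>
    intro ans i buf note
    by_cases hc : c = '/'
    · subst hc
      have hsp : splitC ('/' :: cs) = [] :: splitC cs := by simp [splitC]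
      have hm : modFirst buf ([] :: splitC cs) = buf :: splitC cs := by simp [modFirst]
      rw [hsp, hm]
      by_cases hb : buf = []
      · subst hb
        rw [List.cons_append, goB_cons_slash_nil, ih, modFirst_nil _ (splitC_ne_nil cs)]
        simp
      · by_cases hi : i < 3
        · rw [List.cons_append, goB_cons_slash_lt _ _ _ _ _ hb hi, ih,
            modFirst_nil _ (splitC_ne_nil cs)]
          simp [hb, procNE, hi]
        · rw [List.cons_append, goB_cons_slash_ge _ _ _ _ _ hb hi, ih,
            modFirst_nil _ (splitC_ne_nil cs)]
          simp [hb, procNE, hi]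
    · have h1 : splitC (c :: cs) = modFirst [c] (splitC cs) := by
        simp only [splitC, if_neg hc]
        cases h : splitC cs with
        | nil => exact absurd h (splitC_ne_nil cs)
        | cons p ps => simp [modFirst]
      rw [List.cons_append, goB_cons_ne _ _ _ _ _ _ hc, ih, h1, modFirst_modFirst]

-- PySem's splitOn on sep "/" is splitC
theorem splitOn_go_eq (fuel : Nat) : ∀ (l cur : List Char) (acc : List (List Char)),
    l.length ≤ fuel →
    PySem.Chars.splitOn.go ['/'] fuel l cur acc
      = acc.reverse ++ modFirst cur.reverse (splitC l) := by
  induction fuel with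
  | zero =>
    intro l cur acc hl
    have : l = [] := by cases l <;> simp_all
    subst this
    simp [PySem.Chars.splitOn.go, splitC, modFirst]
  | succ f ih =>
    intro l cur acc hl
    cases l with
    | nil => simp [PySem.Chars.splitOn.go, splitC, modFirst]
    | cons c rest =>
      by_cases hc : c = '/'
      · subst hc
        have hpre : List.isPrefixOf ['/'] ('/' :: rest) = true := by simp [List.isPrefixOf]
        rw [PySem.Chars.splitOn.go, if_pos hpre]
        simp only [List.length_cons] at hl
        rw [ih _ _ _ (by simpa using Nat.le_of_succ_le_succ hl)]
        have hne := splitC_ne_nil rest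
        cases h : splitC rest with
        | nil => exact absurd h hne
        | cons p ps => simp [splitC, modFirst, h]
      · have hpre : List.isPrefixOf ['/'] (c :: rest) = false := by
          simp only [List.isPrefixOf, Bool.and_eq_false_iff, beq_eq_false_iff_ne]
          exact Or.inl fun h => hc h.symm
        rw [PySem.Chars.splitOn.go, if_neg (by simp [hpre])]
        simp only [List.length_cons] at hl
        rw [ih _ _ _ (Nat.le_of_succ_le_succ hl)]
        have h1 : splitC (c :: rest) = modFirst [c] (splitC rest) := by
          simp only [splitC, if_neg hc]
          cases h : splitC rest with
          | nil => exact absurd h (splitC_ne_nil rest)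
          | cons p ps => simp [modFirst]
        rw [h1, modFirst_modFirst]
        simp

theorem splitOn_eq_splitC (s : List Char) :
    PySem.Chars.splitOn s ['/'] = splitC s := by
  rw [PySem.Chars.splitOn, splitOn_go_eq (s.length + 1) s [] [] (by omega)]
  have := splitC_ne_nil s
  cases h : splitC s with
  | nil => exact absurd h this
  | cons p ps => simp [modFirst]

-- tail behaviour of procNE once three keys are taken (i ≥ 3)
theorem procNE_saturated (ps : List (List Char)) : ∀ (ans : PySem.Dict String String)
    (note : List String),
    procNE ps ans 3 note = (ans, note ++ ps.map String.ofList) := by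
  induction ps with
  | nil => intro ans note; simp [procNE]
  | cons p ps ih => intro ans note; simp [procNE, ih]

theorem ofList_beq_empty (p : List Char) : (String.ofList p == "") = decide (p = []) := by
  cases p with
  | nil => rfl
  | cons c cs =>
    simp only [decide_eq_false (by simp : ¬ (c :: cs) = []), beq_eq_false_iff_ne]
    intro h
    have := congrArg String.toList h
    simp at this

theorem filter_map_ofList (l : List (List Char)) :
    (l.map String.ofList).filter (fun x => x != "") = (l.filter (· ≠ [])).map String.ofList := by
  rw [List.filter_map]
  congr 1
  apply List.filter_congr
  intro p _
  simp only [Function.comp_apply, bne, ofList_beq_empty]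
  simp

theorem split_eq (tmp : String) :
    (PySem.Str.split? tmp "/").getD [] = (splitC tmp.toList).map String.ofList := by
  have h : ("/" : String).toList = ['/'] := rfl
  simp [PySem.Str.split?, PySem.Chars.split?, h, splitOn_eq_splitC]

theorem core (ps : List (List Char)) :
    (let tmp2 := ps.map String.ofList
     let ans : PySem.Dict String String := PySem.Dict.empty
     let ans := if tmp2.length > 0 then ans.insert "day" ((PySem.List.pyGet? tmp2 0).getD "") else ans
     let ans := if tmp2.length > 1 then ans.insert "time" ((PySem.List.pyGet? tmp2 1).getD "") else ans
     let ans := if tmp2.length > 2 then ans.insert "machine" ((PySem.List.pyGet? tmp2 2).getD "") else ans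
     let ans := if tmp2.length > 3 then ans.insert "note" (PySem.Str.join "/" (PySem.List.slice tmp2 (some 3) none)) else ans
     ans.items)
    =
    (let st := procNE ps PySem.Dict.empty 0 []
     let ans := if st.2 ≠ [] then st.1.insert "note" (PySem.Str.join "/" st.2) else st.1
     ans.items) := by
  match ps with
  | [] => rfl
  | [a] => simp [procNE, pvKeysB, PySem.List.pyGet?, PySem.List.pyIdx?]
  | [a, b] => simp [procNE, pvKeysB, PySem.List.pyGet?, PySem.List.pyIdx?]
  | [a, b, c] => simp [procNE, pvKeysB, PySem.List.pyGet?, PySem.List.pyIdx?]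
  | a :: b :: c :: d :: rest =>
    simp only [procNE, if_pos (by omega : (0:Nat) < 3), if_pos (by omega : (1:Nat) < 3),
      if_pos (by omega : (2:Nat) < 3)]
    rw [procNE_saturated]
    simp only [Nat.ofNat_nonneg, zero_le_one, PySem.List.pyGet?_of_nonneg, PySem.List.slice_from,
      Int.reduceToNat, le_refl, Int.toNat_zero, Int.toNat_one]
    simp [pvKeysB]

-- ===== VERDICT (by name: the statement is the Claim_ definition above) =====
theorem parse_tmp_spec : Claim_equal_parse_tmp := by
  intro tmp _
  unfold Spec_parse_tmp parse_tmp parse_tmp_alt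
  rw [goB_eq, modFirst_nil _ (splitC_ne_nil _), split_eq]
  simp only [filter_map_ofList]
  exact core _
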